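-- pv_equiv track=rewrite | github.com/khollbach/alpha_o | src/main/puzzle.py | is_jagged
-- ===== SOURCE A (Python) =====
-- def is_jagged(grid):
--     '''([[Color]]) -> bool
--     Return True if the grid is jagged.
--     '''
--     length = None
--     for row in grid:
--         if length is None:
--             length = len(row)
--         else:
--             if len(row) != length:
--                 return True
--     return False
-- ===== SOURCE B (Python) =====
-- def is_jagged(grid):
--     '''([[Color]]) -> bool
--     Return True if the grid is jagged.
--     '''
--     lengths = [len(row) for row in grid]
--     return lengths[1:] != lengths[:-1]
-- ===== Notes on version B (the rewrite author's own statement) =====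
-- stated objective: idiomatic
-- what changed: Replaces the stateful early-exit loop with an eager two-stage formulation: build the list of row lengths once and compare it shifted against itself (lengths[1:] != lengths[:-1]), which is inequal exactly when some adjacent lengths differ.
import Mathlib
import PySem

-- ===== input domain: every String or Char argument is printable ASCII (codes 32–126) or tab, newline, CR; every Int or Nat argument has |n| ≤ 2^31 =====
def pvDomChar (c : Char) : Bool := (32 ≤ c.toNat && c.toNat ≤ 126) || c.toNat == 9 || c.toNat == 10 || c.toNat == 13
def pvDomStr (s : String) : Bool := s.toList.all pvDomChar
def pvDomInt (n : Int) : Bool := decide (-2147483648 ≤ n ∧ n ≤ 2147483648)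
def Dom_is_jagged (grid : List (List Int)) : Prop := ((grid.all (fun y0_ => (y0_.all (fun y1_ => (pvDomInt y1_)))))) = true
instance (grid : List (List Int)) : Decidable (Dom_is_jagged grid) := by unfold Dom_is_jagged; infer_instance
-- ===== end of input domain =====

-- B: instead of A's stateful early-exit loop, builds the list of row lengths once and
-- compares it shifted against itself (lengths[1:] != lengths[:-1]); idiomatic, same cost.

-- ===== PORT A =====
-- the for-loop of A: state = `length` (none = Python's None)
def isJaggedLoopA (length : Option Int) : List (List Int) → Bool
  | [] => false
  | row :: rest =>
    match length with
    | none => isJaggedLoopA (some (row.length : Int)) rest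
    | some l => if (row.length : Int) ≠ l then true else isJaggedLoopA (some l) rest

def is_jagged (grid : List (List Int)) : Bool := isJaggedLoopA none grid

-- ===== PORT B =====
-- lengths = [len(row) for row in grid]; return lengths[1:] != lengths[:-1]
def is_jagged_alt (grid : List (List Int)) : Bool :=
  let lengths : List Int := grid.map (fun row => (row.length : Int))
  decide (PySem.List.slice lengths (some 1) none ≠ PySem.List.slice lengths none (some (-1)))

-- ===== PRECONDITION & SPEC =====
def Spec_is_jagged (grid : List (List Int)) (out : Bool) : Prop := out = is_jagged_alt grid
instance (grid : List (List Int)) (out : Bool) : Decidable (Spec_is_jagged grid out) := by unfold Spec_is_jagged; infer_instance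

-- ===== CLAIM =====
def Claim_equal_is_jagged : Prop := ∀ (grid : List (List Int)), Dom_is_jagged grid → Spec_is_jagged grid (is_jagged grid)

-- ===== LEMMAS AND PROOFS =====
-- A's loop after the first row: true iff some remaining row's length differs from l
theorem loopA_some (rest : List (List Int)) (l : Int) :
    isJaggedLoopA (some l) rest = !(rest.all (fun r => (r.length : Int) == l)) := by
  induction rest generalizing l with
  | nil => rfl
  | cons row rest ih =>
    simp only [isJaggedLoopA, List.all_cons]
    by_cases h : (row.length : Int) = l
    · simp [h, ih]
    · simp [h]

-- tail = dropLast for a nonempty list iff every element equals the head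
theorem tail_eq_dropLast (l : Int) (xs : List Int) :
    (xs = (l :: xs).dropLast) ↔ ∀ x ∈ xs, x = l := by
  induction xs generalizing l with
  | nil => simp
  | cons a xs ih =>
    simp only [List.dropLast_cons₂, List.cons.injEq]
    constructor
    · rintro ⟨rfl, h⟩
      intro x hx
      rcases List.mem_cons.mp hx with rfl | hm
      · rfl
      · exact (ih a).mp h x hm
    · intro h
      have ha := h a (by simp)
      subst ha
      exact ⟨rfl, (ih a).mpr (fun x hx => h x (by simp [hx]))⟩

-- ===== VERDICT =====
theorem is_jagged_spec : Claim_equal_is_jagged := by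
  intro grid _
  unfold Spec_is_jagged is_jagged is_jagged_alt
  cases grid with
  | nil => rfl
  | cons row rest =>
    simp only [isJaggedLoopA, loopA_some, List.map_cons,
      PySem.List.slice_from_one, PySem.List.slice_to_neg_one, List.tail_cons]
    by_cases h : ∀ r ∈ rest, (r.length : Int) = (row.length : Int)
    · have hall : rest.all (fun r => (r.length : Int) == (row.length : Int)) = true := by
        simp only [List.all_eq_true, beq_iff_eq]; exact h
      have he : (rest.map fun r => ((r.length : Int))) =
          ((row.length : Int) :: rest.map fun r => ((r.length : Int))).dropLast :=
        (tail_eq_dropLast _ _).mpr (by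
          intro x hx
          obtain ⟨r, hr, rfl⟩ := List.mem_map.mp hx
          exact h r hr)
      simp [hall, ← he]
    · have hall : rest.all (fun r => (r.length : Int) == (row.length : Int)) = false := by
        rw [← Bool.not_eq_true]
        intro hc
        exact h (by simpa only [List.all_eq_true, beq_iff_eq] using hc)
      have hne : (rest.map fun r => ((r.length : Int))) ≠
          ((row.length : Int) :: rest.map fun r => ((r.length : Int))).dropLast := by
        intro hc
        exact h (by
          intro r hr
          exact (tail_eq_dropLast _ _).mp hc _ (List.mem_map.mpr ⟨r, hr, rfl⟩))
      simp [hall, hne]
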